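-- pv_equiv track=rewrite | github.com/CarsonDavis/password-cracking | packages/crack-time/src/crack_time/estimators/scoring.py | l33t_variations
-- ===== SOURCE A (Python) =====
-- def l33t_variations(word: str, l33t_table: dict[str, list[str]]) -> int:
--     """Compute l33t variation multiplier: total l33t renderings of the word.
--
--     For each character, the attacker must try: keep original + each l33t
--     substitution. The product across all positions gives the full search space.
--     """
--     if not word:
--         return 1
--     variations = 1
--     for char in word:
--         n_subs = len(l33t_table.get(char, []))
--         variations *= 1 + n_subs  # keep original + each l33t option
--     return max(variations, 1)
-- ===== SOURCE B (Python) =====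
-- def l33t_variations(word: str, l33t_table: dict[str, list[str]]) -> int:
--     # Traverse the TABLE, not the word: each single-char key contributes one
--     # exponentiated factor based on how often it occurs in the word.
--     # Characters absent from the table contribute factor 1, so they need no pass.
--     variations = 1
--     for char, subs in l33t_table.items():
--         if len(char) == 1:
--             variations *= (1 + len(subs)) ** word.count(char)
--     return variations
-- ===== Notes on version B (the rewrite author's own statement) =====
-- stated objective: alternative
-- what changed: B iterates over the substitution table's entries (one str.count of the word per single-char key) instead of A's per-position pass over the word with a dict lookup at every character; multi-char keys, which can never match a character, are skipped, and the product of factors >= 1 makes A's max(...,1) and empty-word guards unnecessary.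
import Mathlib
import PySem

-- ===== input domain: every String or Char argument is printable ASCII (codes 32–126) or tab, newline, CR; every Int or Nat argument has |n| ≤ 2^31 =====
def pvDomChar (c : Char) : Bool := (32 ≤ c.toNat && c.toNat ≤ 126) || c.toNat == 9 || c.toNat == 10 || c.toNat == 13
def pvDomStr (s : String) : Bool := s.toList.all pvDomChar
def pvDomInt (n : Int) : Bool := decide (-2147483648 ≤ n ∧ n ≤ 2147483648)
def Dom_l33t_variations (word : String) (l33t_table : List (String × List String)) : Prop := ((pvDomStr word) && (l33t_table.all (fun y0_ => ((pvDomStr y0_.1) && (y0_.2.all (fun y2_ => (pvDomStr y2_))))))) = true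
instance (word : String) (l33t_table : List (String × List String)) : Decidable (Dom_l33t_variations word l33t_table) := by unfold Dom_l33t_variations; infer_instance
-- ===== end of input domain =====

-- B traverses the substitution TABLE (one word.count per single-char key) instead of A's per-position pass over the word (objective: alternative).

-- ===== PORT A =====
def l33t_variations (word : String) (l33t_table : List (String × List String)) : Int :=
  if word.toList = [] then 1
  else
    let d := PySem.Dict.ofList l33t_table
    let variations := word.toList.foldl
      (fun v c => v * (1 + ((d.getD (String.ofList [c]) []).length : Int))) 1
    max variations 1

-- ===== PORT B =====
def l33t_variations_alt (word : String) (l33t_table : List (String × List String)) : Int :=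
  (PySem.Dict.ofList l33t_table).items.foldl
    (fun v p =>
      if p.1.toList.length = 1
      then v * (1 + (p.2.length : Int)) ^ (PySem.Str.count word p.1)
      else v) 1

-- ===== PRECONDITION & SPEC =====
def Spec_l33t_variations (word : String) (l33t_table : List (String × List String)) (out : Int) : Prop := out = l33t_variations_alt word l33t_table
instance (word : String) (l33t_table : List (String × List String)) (out : Int) : Decidable (Spec_l33t_variations word l33t_table out) := by unfold Spec_l33t_variations; infer_instance

-- ===== CLAIM (what is proved, stated in full; the proofs are below) =====
def Claim_equal_l33t_variations : Prop := ∀ (word : String) (l33t_table : List (String × List String)), Dom_l33t_variations word l33t_table → Spec_l33t_variations word l33t_table (l33t_variations word l33t_table)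

-- ===== LEMMAS AND PROOFS =====

-- Python str.count with a single-character needle is the character count.
theorem charsCount_go_singleton (ch : Char) :
    ∀ (l : List Char) (fuel acc : Nat), l.length ≤ fuel →
      PySem.Chars.count.go [ch] fuel l acc = acc + l.count ch := by
  intro l
  induction l with
  | nil => intro fuel acc _; cases fuel <;> simp [PySem.Chars.count.go]
  | cons h t ih =>
    intro fuel acc hf
    cases fuel with
    | zero => simp at hf
    | succ f =>
      by_cases hc : h = ch
      · subst hc
        simp only [PySem.Chars.count.go, List.isPrefixOf, BEq.rfl, Bool.true_and,
          if_true, List.length_cons, List.length_nil, List.drop_succ_cons, List.drop_zero]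
        rw [ih f (acc + 1) (by simpa using hf)]
        simp [List.count_cons]
        omega
      · have : ([ch].isPrefixOf (h :: t)) = false := by
          simp [List.isPrefixOf]
          exact fun hh => absurd hh.symm hc
        simp only [PySem.Chars.count.go, this, if_false]
        rw [ih f acc (by simpa using hf)]
        simp [List.count_cons, hc]

theorem charsCount_singleton (xs : List Char) (ch : Char) :
    PySem.Chars.count xs [ch] = xs.count ch := by
  simpa using charsCount_go_singleton ch xs xs.length 0 le_rfl

-- a foldl-with-multiply is the product of the mapped list
theorem foldl_mul_eq_prod {α : Type} (f : α → Int) (l : List α) (a : Int) :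
    l.foldl (fun v x => v * f x) a = a * (l.map f).prod := by
  induction l generalizing a with
  | nil => simp
  | cons x xs ih => simp [ih, mul_assoc]

theorem one_le_prod_int (l : List Int) (h : ∀ x ∈ l, 1 ≤ x) : 1 ≤ l.prod := by
  induction l with
  | nil => simp
  | cons x xs ih =>
    simp only [List.prod_cons]
    have hx := h x (by simp)
    have hxs := ih (fun y hy => h y (by simp [hy]))
    nlinarith

-- split a product by a predicate whose complement side is constantly 1
theorem prod_ite_split (xs : List Char) (p : Char → Bool) (t : Int) (b : Char → Int)
    (hb : ∀ c, p c = true → b c = 1) :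
    (xs.map (fun c => if p c then t else b c)).prod
      = t ^ (xs.countP p) * (xs.map b).prod := by
  induction xs with
  | nil => simp
  | cons x xs ih =>
    by_cases hx : p x = true
    · simp [hx, ih, hb x hx, List.countP_cons, pow_succ]
      ring
    · simp [hx, ih, List.countP_cons]
      ring

-- the per-character product over the word equals B's per-table-entry product
theorem table_prod_eq_word_prod (xs : List Char) :
    ∀ (its : List (String × List String)), (its.map (·.1)).Nodup →
      its.foldl
        (fun v p =>
          if p.1.toList.length = 1
          then v * (1 + (p.2.length : Int)) ^ (PySem.Chars.count xs p.1.toList)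
          else v) 1
      = (xs.map (fun c =>
          1 + (((PySem.Dict.mk its).getD (String.ofList [c]) []).length : Int))).prod := by
  intro its
  induction its with
  | nil =>
    intro _
    have : (xs.map (fun c =>
        1 + (((PySem.Dict.mk ([] : List (String × List String))).getD (String.ofList [c]) []).length : Int)))
        = xs.map (fun _ => (1 : Int)) := by
      simp [PySem.Dict.getD_eq_get?_getD, PySem.Dict.get?]
    simp [this]
  | cons q rest ih =>
    intro hnd
    obtain ⟨k, s⟩ := q
    have hndr : (rest.map (·.1)).Nodup := (List.nodup_cons.mp hnd).2
    have hknr : k ∉ rest.map (·.1) := (List.nodup_cons.mp hnd).1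
    -- the head entry factors out of B's fold
    have hbodyfun : (fun (v : Int) (p : String × List String) =>
          if p.1.toList.length = 1
          then v * (1 + (p.2.length : Int)) ^ (PySem.Chars.count xs p.1.toList)
          else v)
        = (fun (v : Int) (p : String × List String) =>
            v * (if p.1.toList.length = 1
                 then (1 + (p.2.length : Int)) ^ (PySem.Chars.count xs p.1.toList)
                 else 1)) := by
      funext v p
      by_cases h : p.1.toList.length = 1 <;> simp [h]
    have hfold :
        ((k, s) :: rest).foldl
          (fun v p =>
            if p.1.toList.length = 1
            then v * (1 + (p.2.length : Int)) ^ (PySem.Chars.count xs p.1.toList)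
            else v) 1
        = (if k.toList.length = 1
            then (1 + (s.length : Int)) ^ (PySem.Chars.count xs k.toList)
            else 1)
          * rest.foldl
              (fun v p =>
                if p.1.toList.length = 1
                then v * (1 + (p.2.length : Int)) ^ (PySem.Chars.count xs p.1.toList)
                else v) 1 := by
      rw [hbodyfun, List.foldl_cons, foldl_mul_eq_prod, foldl_mul_eq_prod]
      ring
    rw [hfold, ih hndr]
    -- relate lookups in the extended dict to lookups in the rest
    have hget : ∀ c : Char,
        (PySem.Dict.mk ((k, s) :: rest)).getD (String.ofList [c]) []
        = if k == String.ofList [c] then s else (PySem.Dict.mk rest).getD (String.ofList [c]) [] := by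
      intro c
      rw [PySem.Dict.getD_eq_get?_getD, PySem.Dict.get?_mk_cons]
      by_cases h : k == String.ofList [c] <;>
        simp [h, PySem.Dict.getD_eq_get?_getD]
    have hmap :
        (xs.map (fun c =>
            1 + (((PySem.Dict.mk ((k, s) :: rest)).getD (String.ofList [c]) []).length : Int)))
        = xs.map (fun c =>
            if (k == String.ofList [c] : Bool)
            then 1 + (s.length : Int)
            else 1 + (((PySem.Dict.mk rest).getD (String.ofList [c]) []).length : Int)) := by
      apply List.map_congr_left
      intro c _
      rw [hget c]
      by_cases h : (k == String.ofList [c] : Bool) <;> simp [h]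
    rw [hmap]
    -- if c's singleton string is k, then k is not a key of rest, so rest lookup is []
    have hb : ∀ c : Char, (k == String.ofList [c] : Bool) = true →
        (1 + (((PySem.Dict.mk rest).getD (String.ofList [c]) []).length : Int)) = 1 := by
      intro c hkc
      have hk' : k = String.ofList [c] := by simpa using hkc
      have : (PySem.Dict.mk rest).get? (String.ofList [c]) = none := by
        rw [PySem.Dict.get?_eq_none_iff_not_mem_keys]
        simpa [PySem.Dict.keys, ← hk'] using hknr
      simp [PySem.Dict.getD_eq_get?_getD, this]
    rw [prod_ite_split xs (fun c => k == String.ofList [c]) _ _ hb]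
    -- compute the exponent: occurrences of k (as a single char) in xs
    congr 1
    by_cases hk : k.toList.length = 1
    · obtain ⟨ch, hch⟩ : ∃ ch, k.toList = [ch] := by
        cases hkl : k.toList with
        | nil => simp [hkl] at hk
        | cons a l => cases l with
          | nil => exact ⟨a, rfl⟩
          | cons b l' => simp [hkl] at hk
      have hkeq : k = String.ofList [ch] := by
        rw [← hch, String.ofList_toList]
      have hcnt : xs.countP (fun c => k == String.ofList [c]) = xs.count ch := by
        rw [List.count]
        apply List.countP_congr
        intro c _
        constructor
        · intro h
          have : String.ofList [ch] = String.ofList [c] := by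
            rw [← hkeq]; simpa using h
          have h2 : ([ch] : List Char) = [c] := by
            have h3 := congrArg String.toList this
            simpa [String.toList_ofList] using h3
          simp only [List.cons.injEq, and_true] at h2
          simp [h2]
        · intro h
          have : c = ch := by simpa using h
          subst this
          simp [hkeq]
      rw [if_pos hk, hch, charsCount_singleton, hcnt]
    · have hcnt : xs.countP (fun c => k == String.ofList [c]) = 0 := by
        rw [List.countP_eq_zero]
        intro c _
        simp only [beq_iff_eq]
        intro h
        apply hk
        rw [h]
        simp
      rw [if_neg hk, hcnt, pow_zero]

-- ===== VERDICT (by name: the statement is the Claim_ definition above) =====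
theorem l33t_variations_spec : Claim_equal_l33t_variations := by
  intro word l33t_table _
  simp only [Spec_l33t_variations, l33t_variations, l33t_variations_alt, PySem.Str.count_eq]
  set d := PySem.Dict.ofList l33t_table with hd
  have hmk : PySem.Dict.mk d.items = d := rfl
  have hnd : (d.items.map (·.1)).Nodup := PySem.Dict.nodup_keys_ofList l33t_table
  have hB := table_prod_eq_word_prod word.toList d.items hnd
  rw [hmk] at hB
  have hA : word.toList.foldl
      (fun v c => v * (1 + ((d.getD (String.ofList [c]) []).length : Int))) 1
      = (word.toList.map (fun c => 1 + ((d.getD (String.ofList [c]) []).length : Int))).prod := by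
    rw [foldl_mul_eq_prod]; simp
  have h1A : 1 ≤ (word.toList.map (fun c => 1 + ((d.getD (String.ofList [c]) []).length : Int))).prod :=
    one_le_prod_int _ (by
      intro y hy
      obtain ⟨c, _, rfl⟩ := List.mem_map.mp hy
      have : (0 : Int) ≤ ((d.getD (String.ofList [c]) []).length : Int) := by positivity
      omega)
  by_cases hnil : word.toList = []
  · rw [if_pos hnil, hB]
    simp [hnil]
  · rw [if_neg hnil, hA, hB, max_eq_left h1A]
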